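-- pv_equiv track=rewrite | github.com/Ricefrog/walPy | walPy.py | merge_similar_colors
-- ===== SOURCE A (Python) =====
-- from collections import defaultdict
--
-- tolerance = 20
--
-- def is_similar(col_1, col_2):
--     if (abs(col_1[0] - col_2[0]) < tolerance
--             and abs(col_1[1] - col_2[1]) < tolerance
--             and abs(col_1[2] - col_2[2]) < tolerance):
--         return True
--     return False
--
-- def merge_similar_colors(color_dict):
--     new_color_dict = defaultdict(int)
--
--     for key, val in color_dict.items():
--         similar = False
--         for col in new_color_dict.keys():
--             if is_similar(key, col):
--                 similar = True
--                 new_color_dict[col] += val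
--                 break
--         if not similar:
--             new_color_dict[key] += val
--     return new_color_dict
-- ===== SOURCE B (Python) =====
-- tolerance = 20
--
-- def merge_similar_colors(color_dict):
--     reps = []     # representatives in insertion order
--     counts = {}   # rep -> accumulated count
--     grid = {}     # (c0,c1,c2) -> list of (index, r0, r1, r2, rep) for reps in that cell
--     for key, val in color_dict.items():
--         k0, k1, k2 = key[0], key[1], key[2]
--         c0, c1, c2 = k0 // tolerance, k1 // tolerance, k2 // tolerance
--         best_idx = -1
--         best_rep = None
--         for d0 in (-1, 0, 1):
--             for d1 in (-1, 0, 1):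
--                 for d2 in (-1, 0, 1):
--                     for idx, r0, r1, r2, rep in grid.get((c0 + d0, c1 + d1, c2 + d2), ()):
--                         if (abs(k0 - r0) < tolerance and abs(k1 - r1) < tolerance
--                                 and abs(k2 - r2) < tolerance
--                                 and (best_idx < 0 or idx < best_idx)):
--                             best_idx = idx
--                             best_rep = rep
--         if best_rep is not None:
--             counts[best_rep] = counts[best_rep] + val
--         else:
--             reps.append(key)
--             counts[key] = val
--             grid.setdefault((c0, c1, c2), []).append((len(reps) - 1, k0, k1, k2, key))
--     return {rep: counts[rep] for rep in reps}
-- ===== Notes on version B (the rewrite author's own statement) =====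
-- stated objective: faster
-- what changed: B replaces A's inner linear scan over all previously kept representatives by a spatial hash grid with cell size = tolerance: each color is bucketed by (r//20, g//20, b//20) and only the 27 neighbouring cells are searched, picking the similar representative with the smallest insertion index (= the first one A's scan would hit).
-- outside the precondition, e.g. on merge_similar_colors({(1,): 1}): A returns {(1,): 1}, B raises IndexError
import Mathlib
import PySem

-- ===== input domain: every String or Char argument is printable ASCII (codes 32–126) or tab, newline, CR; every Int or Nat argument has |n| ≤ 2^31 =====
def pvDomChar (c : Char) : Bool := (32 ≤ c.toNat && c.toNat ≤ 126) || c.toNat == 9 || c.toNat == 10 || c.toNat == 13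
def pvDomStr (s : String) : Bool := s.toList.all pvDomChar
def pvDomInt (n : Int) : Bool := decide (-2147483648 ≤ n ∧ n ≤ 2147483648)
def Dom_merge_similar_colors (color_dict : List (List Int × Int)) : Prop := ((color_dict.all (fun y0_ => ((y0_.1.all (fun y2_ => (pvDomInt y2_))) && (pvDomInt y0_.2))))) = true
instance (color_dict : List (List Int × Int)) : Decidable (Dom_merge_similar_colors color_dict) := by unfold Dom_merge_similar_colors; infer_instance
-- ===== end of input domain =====

-- B replaces A's linear scan of all representatives by a spatial grid (cell = tolerance)
-- so each color only checks the 27 neighbouring cells; equivalence of the RETURN value is proved.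

-- ===== PORT A =====
-- is_similar(col_1, col_2): Python's `and` short-circuits, so later indexings only
-- happen when the earlier |diff| tests pass; none = IndexError.
def is_similarA (col_1 col_2 : List Int) : Option Bool :=
  match PySem.List.pyGet? col_1 0, PySem.List.pyGet? col_2 0 with
  | some a0, some b0 =>
    if |a0 - b0| < 20 then
      match PySem.List.pyGet? col_1 1, PySem.List.pyGet? col_2 1 with
      | some a1, some b1 =>
        if |a1 - b1| < 20 then
          match PySem.List.pyGet? col_1 2, PySem.List.pyGet? col_2 2 with
          | some a2, some b2 => some (decide (|a2 - b2| < 20))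
          | _, _ => none
        else some false
      | _, _ => none
    else some false
  | _, _ => none

-- the inner `for col in new_color_dict.keys(): if is_similar … break` loop:
-- some (some col) = first similar key, some none = no similar key, none = IndexError
def scanA (key : List Int) : List (List Int) → Option (Option (List Int))
  | [] => some none
  | col :: rest =>
    match is_similarA key col with
    | none => none
    | some true => some (some col)
    | some false => scanA key rest

def loopA : List (List Int × Int) → PySem.Dict (List Int) Int → Option (PySem.Dict (List Int) Int)
  | [], d => some d
  | (key, val) :: rest, d =>
    match scanA key d.keys with
    | none => none
    | some (some col) => loopA rest (d.insert col (d.getD col 0 + val))   -- new_color_dict[col] += val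
    | some none => loopA rest (d.insert key (d.getD key 0 + val))         -- new_color_dict[key] += val

def merge_similar_colors (color_dict : List (List Int × Int)) : List (List Int × Int) :=
  ((loopA color_dict PySem.Dict.empty).map PySem.Dict.items).getD []
  -- `.getD []` only on inputs where the Python raises IndexError (excluded by Pre_)

-- ===== PORT B =====
abbrev EntryB := Int × Int × Int × Int × List Int   -- (index, r0, r1, r2, rep)

-- the body of the innermost `for idx, r0, r1, r2, rep in grid.get(...)` loop
def bestStep (k0 k1 k2 : Int) (st : Int × Option (List Int)) (e : EntryB) : Int × Option (List Int) :=
  match e with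
  | (idx, r0, r1, r2, rep) =>
    if decide (|k0 - r0| < 20) && decide (|k1 - r1| < 20) && decide (|k2 - r2| < 20) &&
       (decide (st.1 < 0) || decide (idx < st.1))
    then (idx, some rep) else st

-- the three nested `for d0/d1/d2 in (-1, 0, 1)` loops around it
def scanB (k0 k1 k2 c0 c1 c2 : Int) (grid : PySem.Dict (Int × Int × Int) (List EntryB)) :
    Int × Option (List Int) :=
  [(-1 : Int), 0, 1].foldl (fun st d0 =>
    [(-1 : Int), 0, 1].foldl (fun st d1 =>
      [(-1 : Int), 0, 1].foldl (fun st d2 =>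
        (grid.getD (c0 + d0, c1 + d1, c2 + d2) []).foldl (bestStep k0 k1 k2) st) st) st)
    ((-1 : Int), none)

def loopB :
    List (List Int × Int) →
    List (List Int) × PySem.Dict (List Int) Int × PySem.Dict (Int × Int × Int) (List EntryB) →
    Option (List (List Int) × PySem.Dict (List Int) Int × PySem.Dict (Int × Int × Int) (List EntryB))
  | [], st => some st
  | (key, val) :: rest, (reps, counts, grid) =>
    match PySem.List.pyGet? key 0, PySem.List.pyGet? key 1, PySem.List.pyGet? key 2 with
    | some k0, some k1, some k2 =>
      let c0 := PySem.Int.floordiv k0 20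
      let c1 := PySem.Int.floordiv k1 20
      let c2 := PySem.Int.floordiv k2 20
      let best := scanB k0 k1 k2 c0 c1 c2 grid
      match best.2 with
      | some rep =>
        -- counts[best_rep] = counts[best_rep] + val  (best_rep is always a key of counts)
        loopB rest (reps, counts.insert rep (counts.getD rep 0 + val), grid)
      | none =>
        -- reps.append(key); counts[key] = val; grid.setdefault(cell, []).append(...)
        loopB rest (reps ++ [key], counts.insert key val,
          grid.modify (c0, c1, c2) [] (· ++ [((reps.length : Int), k0, k1, k2, key)]))
    | _, _, _ => none

def merge_similar_colors_alt (color_dict : List (List Int × Int)) : List (List Int × Int) :=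
  match loopB color_dict ([], PySem.Dict.empty, PySem.Dict.empty) with
  | some (reps, counts, _) =>
    -- {rep: counts[rep] for rep in reps}  (every rep is a key of counts)
    (reps.foldl (fun d r => d.insert r (counts.getD r 0)) PySem.Dict.empty).items
  | none => []   -- only on inputs where the Python raises IndexError (excluded by Pre_)

-- ===== PRECONDITION & SPEC =====
-- Pre_ excludes (1) association lists with duplicate keys — a Python dict cannot contain
-- them, the list→dict conversion silently merges them, so no port can be faithful there —
-- and (2) keys with fewer than 3 components: indexing them raises IndexError in A whenever
-- such a key is actually compared, and always in B's cell computation.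
def Pre_merge_similar_colors (color_dict : List (List Int × Int)) : Prop :=
  (color_dict.map Prod.fst).Nodup ∧ ∀ p ∈ color_dict, 3 ≤ p.1.length

instance (color_dict : List (List Int × Int)) : Decidable (Pre_merge_similar_colors color_dict) := by
  unfold Pre_merge_similar_colors; infer_instance

def pvWitness_merge_similar_colors : (List (List Int × Int)) :=
  [([0, 0, 0], 3), ([5, 5, 5], 2), ([100, 100, 100], 7), ([-90, 0, 250], 1)]

def Spec_merge_similar_colors (color_dict : List (List Int × Int)) (out : List (List Int × Int)) : Prop := out = merge_similar_colors_alt color_dict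
instance (color_dict : List (List Int × Int)) (out : List (List Int × Int)) : Decidable (Spec_merge_similar_colors color_dict out) := by unfold Spec_merge_similar_colors; infer_instance

-- ===== CLAIM (what is proved, stated in full; the proofs are below) =====
def Claim_equal_merge_similar_colors : Prop := ∀ (color_dict : List (List Int × Int)), Dom_merge_similar_colors color_dict → Pre_merge_similar_colors color_dict → Spec_merge_similar_colors color_dict (merge_similar_colors color_dict)

-- ===== LEMMAS AND PROOFS =====

-- the first three components of a color (all reps/keys in play have length ≥ 3)
def coord0 (r : List Int) : Int := r.getD 0 0
def coord1 (r : List Int) : Int := r.getD 1 0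
def coord2 (r : List Int) : Int := r.getD 2 0

def cellF (r : List Int) : Int × Int × Int :=
  (PySem.Int.floordiv (coord0 r) 20, PySem.Int.floordiv (coord1 r) 20, PySem.Int.floordiv (coord2 r) 20)

def simB (k r : List Int) : Bool :=
  decide (|coord0 k - coord0 r| < 20) && decide (|coord1 k - coord1 r| < 20) &&
  decide (|coord2 k - coord2 r| < 20)

def entryOf (p : List Int × Nat) : EntryB :=
  ((p.2 : Int), coord0 p.1, coord1 p.1, coord2 p.1, p.1)

def simE (k0 k1 k2 : Int) (e : EntryB) : Bool :=
  decide (|k0 - e.2.1| < 20) && decide (|k1 - e.2.2.1| < 20) && decide (|k2 - e.2.2.2.1| < 20)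

def GridInv (reps : List (List Int)) (grid : PySem.Dict (Int × Int × Int) (List EntryB)) : Prop :=
  ∀ c, grid.getD c [] =
    (reps.zipIdx.filter (fun p => decide (cellF p.1 = c))).map entryOf

def StInv (d : PySem.Dict (List Int) Int) (reps : List (List Int))
    (counts : PySem.Dict (List Int) Int) (grid : PySem.Dict (Int × Int × Int) (List EntryB)) : Prop :=
  d = PySem.Dict.mk (reps.map (fun r => (r, counts.getD r 0))) ∧
  reps.Nodup ∧ (∀ r ∈ reps, 3 ≤ r.length) ∧ GridInv reps grid

lemma exists_three {l : List Int} (h : 3 ≤ l.length) : ∃ a b c t, l = a :: b :: c :: t := by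
  cases l with
  | nil => simp at h
  | cons a t =>
    cases t with
    | nil => simp at h
    | cons b t =>
      cases t with
      | nil => simp at h
      | cons c t => exact ⟨a, b, c, t, rfl⟩

lemma pyGet?_len3_0 {l : List Int} (h : 3 ≤ l.length) : PySem.List.pyGet? l 0 = some (coord0 l) := by
  obtain ⟨a, b, c, t, rfl⟩ := exists_three h
  simp [PySem.List.pyGet?, PySem.List.pyIdx?, coord0,
    show (0:Int) ≤ (t.length:Int) + 1 + 1 from by omega]

lemma pyGet?_len3_1 {l : List Int} (h : 3 ≤ l.length) : PySem.List.pyGet? l 1 = some (coord1 l) := by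
  obtain ⟨a, b, c, t, rfl⟩ := exists_three h
  simp [PySem.List.pyGet?, PySem.List.pyIdx?, coord1,
    show (0:Int) ≤ (t.length:Int) + 1 from by omega]

lemma pyGet?_len3_2 {l : List Int} (h : 3 ≤ l.length) : PySem.List.pyGet? l 2 = some (coord2 l) := by
  obtain ⟨a, b, c, t, rfl⟩ := exists_three h
  simp [PySem.List.pyGet?, PySem.List.pyIdx?, coord2,
    show (2:Int) ≤ (t.length:Int) + 1 + 1 from by omega]

lemma is_similarA_eq {k r : List Int} (hk : 3 ≤ k.length) (hr : 3 ≤ r.length) :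
    is_similarA k r = some (simB k r) := by
  rw [is_similarA]
  rw [pyGet?_len3_0 hk, pyGet?_len3_0 hr, pyGet?_len3_1 hk, pyGet?_len3_1 hr,
    pyGet?_len3_2 hk, pyGet?_len3_2 hr]
  by_cases h0 : |coord0 k - coord0 r| < 20 <;>
    by_cases h1 : |coord1 k - coord1 r| < 20 <;>
      simp [h0, h1, simB]

lemma scanA_eq {k : List Int} (hk : 3 ≤ k.length) :
    ∀ {cols : List (List Int)}, (∀ c ∈ cols, 3 ≤ c.length) →
    scanA k cols = some (cols.find? (simB k)) := by
  intro cols hcols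
  induction cols with
  | nil => simp [scanA]
  | cons c cs ih =>
    have hc : 3 ≤ c.length := hcols c (by simp)
    rw [scanA, is_similarA_eq hk hc]
    cases hsim : simB k c with
    | true => simp [hsim]
    | false =>
      simp only [List.find?_cons, hsim]
      exact ih (fun x hx => hcols x (by simp [hx]))

lemma simB_refl {k : List Int} : simB k k = true := by
  simp [simB]

lemma bestStep_eq (k0 k1 k2 : Int) (st : Int × Option (List Int)) (e : EntryB) :
    bestStep k0 k1 k2 st e =
      if simE k0 k1 k2 e && (decide (st.1 < 0) || decide (e.1 < st.1))
      then (e.1, some e.2.2.2.2) else st := by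
  rcases e with ⟨idx, r0, r1, r2, rep⟩
  simp [bestStep, simE, Bool.and_assoc]

-- specification of the grid scan's fold
def ScanOut (k0 k1 k2 : Int) (pool : List EntryB) (st : Int × Option (List Int)) : Prop :=
  (st = (-1, none) ∧ ∀ e ∈ pool, simE k0 k1 k2 e = false) ∨
  (∃ e ∈ pool, simE k0 k1 k2 e = true ∧ st = (e.1, some e.2.2.2.2) ∧
    ∀ e' ∈ pool, simE k0 k1 k2 e' = true → st.1 ≤ e'.1)

lemma scan_out (k0 k1 k2 : Int) (pool : List EntryB) (hpos : ∀ e ∈ pool, 0 ≤ e.1) :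
    ScanOut k0 k1 k2 pool (pool.foldl (bestStep k0 k1 k2) ((-1 : Int), none)) := by
  induction pool using List.reverseRecOn with
  | nil => exact Or.inl ⟨rfl, by simp⟩
  | append_singleton pool e ih =>
    have he : (0:Int) ≤ e.1 := hpos e (by simp)
    rw [List.foldl_append, List.foldl_cons, List.foldl_nil, bestStep_eq]
    rcases ih (fun x hx => hpos x (by simp [hx])) with ⟨hst, hnone⟩ | ⟨f, hmem, hsim, hst, hmin⟩
    · rw [hst]
      cases hs : simE k0 k1 k2 e with
      | true =>
        rw [if_pos (by simp)]
        right
        refine ⟨e, by simp, hs, rfl, ?_⟩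
        intro e' he' hse'
        rcases List.mem_append.mp he' with h | h
        · exact absurd hse' (by simp [hnone e' h])
        · simp only [List.mem_singleton] at h; subst h; simp
      | false =>
        rw [if_neg (by simp)]
        left
        refine ⟨rfl, ?_⟩
        intro e' he'
        rcases List.mem_append.mp he' with h | h
        · exact hnone e' h
        · simp only [List.mem_singleton] at h; subst h; exact hs
    · have hf0 : (0:Int) ≤ f.1 := hpos f (by simp [hmem])
      replace hmin : ∀ e' ∈ pool, simE k0 k1 k2 e' = true → f.1 ≤ e'.1 := by
        intro e' h1 h2
        have h3 := hmin e' h1 h2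
        rw [hst] at h3
        exact h3
      rw [hst]
      cases hs : simE k0 k1 k2 e with
      | true =>
        by_cases hlt : e.1 < f.1
        · rw [if_pos (by simp [hlt])]
          right
          refine ⟨e, by simp, hs, rfl, ?_⟩
          intro e' he' hse'
          rcases List.mem_append.mp he' with h | h
          · have := hmin e' h hse'
            simp only
            omega
          · simp only [List.mem_singleton] at h; subst h; simp
        · rw [if_neg (by simp; omega)]
          right
          refine ⟨f, by simp [hmem], hsim, rfl, ?_⟩
          intro e' he' hse'
          rcases List.mem_append.mp he' with h | h
          · exact hmin e' h hse'
          · simp only [List.mem_singleton] at h; subst h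
            simp only
            omega
      | false =>
        rw [if_neg (by simp)]
        right
        refine ⟨f, by simp [hmem], hsim, rfl, ?_⟩
        intro e' he' hse'
        rcases List.mem_append.mp he' with h | h
        · exact hmin e' h hse'
        · simp only [List.mem_singleton] at h; subst h
          exact absurd hse' (by simp [hs])

-- the neighbouring-cells pool of the scan, flattened
def poolOf (c0 c1 c2 : Int) (grid : PySem.Dict (Int × Int × Int) (List EntryB)) : List EntryB :=
  [(-1 : Int), 0, 1].flatMap (fun d0 =>
    [(-1 : Int), 0, 1].flatMap (fun d1 =>
      [(-1 : Int), 0, 1].flatMap (fun d2 =>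
        grid.getD (c0 + d0, c1 + d1, c2 + d2) [])))

lemma scanB_eq_foldl (k0 k1 k2 c0 c1 c2 : Int) (grid : PySem.Dict (Int × Int × Int) (List EntryB)) :
    scanB k0 k1 k2 c0 c1 c2 grid = (poolOf c0 c1 c2 grid).foldl (bestStep k0 k1 k2) ((-1 : Int), none) := by
  simp only [scanB, poolOf, List.foldl_flatMap]

lemma cell_neighbor {x y : Int} (h : |x - y| < 20) :
    ∃ d, (d = -1 ∨ d = 0 ∨ d = 1) ∧ PySem.Int.floordiv y 20 = PySem.Int.floordiv x 20 + d := by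
  simp only [PySem.Int.floordiv_eq_ediv_of_pos (show (0:Int) < 20 by norm_num)]
  rw [abs_lt] at h
  exact ⟨y / 20 - x / 20, by omega, by omega⟩

lemma mem_zipIdx_self {reps : List (List Int)} {i : Nat} (h : i < reps.length) :
    (reps[i], i) ∈ reps.zipIdx := by
  have hl : i < reps.zipIdx.length := by simpa using h
  have h2 := List.getElem_zipIdx (l := reps) (i := i) (h := hl)
  simp only [Nat.zero_add] at h2
  rw [← h2]
  exact List.getElem_mem hl

lemma zipIdx_fst_mem {reps : List (List Int)} {p : List Int × Nat} (hp : p ∈ reps.zipIdx) :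
    p.1 ∈ reps ∧ p.2 < reps.length := by
  rcases p with ⟨r, i⟩
  obtain ⟨-, h2, h3⟩ := List.mem_zipIdx hp
  simp only [Nat.zero_add] at h2
  simp only [Nat.sub_zero] at h3
  refine ⟨?_, h2⟩
  rw [h3]
  exact List.getElem_mem h2

lemma zipIdx_fst_getElem {reps : List (List Int)} {p : List Int × Nat} (hp : p ∈ reps.zipIdx)
    (h : p.2 < reps.length) : p.1 = reps[p.2] := by
  rcases p with ⟨r, i⟩
  obtain ⟨-, -, h3⟩ := List.mem_zipIdx hp
  simp only [Nat.sub_zero] at h3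
  exact h3

lemma simE_entryOf {key : List Int} {p : List Int × Nat} :
    simE (coord0 key) (coord1 key) (coord2 key) (entryOf p) = simB key p.1 := by
  rfl

-- the scan over the 27 neighbouring buckets finds exactly the first similar representative
lemma scan_bridge {key : List Int} {reps : List (List Int)}
    {grid : PySem.Dict (Int × Int × Int) (List EntryB)} (hg : GridInv reps grid) :
    (scanB (coord0 key) (coord1 key) (coord2 key)
      (PySem.Int.floordiv (coord0 key) 20) (PySem.Int.floordiv (coord1 key) 20)
      (PySem.Int.floordiv (coord2 key) 20) grid).2 = reps.find? (simB key) := by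
  rw [scanB_eq_foldl]
  set k0 := coord0 key
  set k1 := coord1 key
  set k2 := coord2 key
  set pool := poolOf (PySem.Int.floordiv k0 20) (PySem.Int.floordiv k1 20) (PySem.Int.floordiv k2 20) grid with hpool
  have hsound : ∀ e ∈ pool, ∃ p ∈ reps.zipIdx, e = entryOf p := by
    intro e he
    simp only [hpool, poolOf, List.mem_flatMap] at he
    obtain ⟨d0, -, d1, -, d2, -, hmem⟩ := he
    rw [hg] at hmem
    obtain ⟨p, hp, rfl⟩ := List.mem_map.mp hmem
    exact ⟨p, (List.mem_filter.mp hp).1, rfl⟩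
  have hpos : ∀ e ∈ pool, 0 ≤ e.1 := by
    intro e he
    obtain ⟨p, -, rfl⟩ := hsound e he
    simp [entryOf]
  have hcomplete : ∀ i, (h : i < reps.length) → simB key reps[i] = true →
      entryOf (reps[i], i) ∈ pool := by
    intro i h hsim
    have hs := hsim
    simp only [simB, Bool.and_eq_true, decide_eq_true_eq] at hs
    obtain ⟨⟨h0, h1⟩, h2⟩ := hs
    obtain ⟨d0, hd0, hc0⟩ := cell_neighbor h0
    obtain ⟨d1, hd1, hc1⟩ := cell_neighbor h1
    obtain ⟨d2, hd2, hc2⟩ := cell_neighbor h2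
    simp only [hpool, poolOf, List.mem_flatMap]
    refine ⟨d0, by rcases hd0 with h|h|h <;> simp [h], d1, by rcases hd1 with h|h|h <;> simp [h],
      d2, by rcases hd2 with h|h|h <;> simp [h], ?_⟩
    rw [hg]
    apply List.mem_map.mpr
    refine ⟨(reps[i], i), List.mem_filter.mpr ⟨mem_zipIdx_self h, ?_⟩, rfl⟩
    simp only [cellF, decide_eq_true_eq]
    exact Prod.ext hc0 (Prod.ext hc1 hc2)
  cases hf : reps.find? (simB key) with
  | none =>
    have hall : ∀ r ∈ reps, ¬ simB key r = true := List.find?_eq_none.mp hf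
    rcases scan_out k0 k1 k2 pool hpos with ⟨hst, -⟩ | ⟨e, hmem, hsim, -, -⟩
    · rw [hst]
    · exfalso
      obtain ⟨p, hp, rfl⟩ := hsound e hmem
      rw [simE_entryOf] at hsim
      exact hall p.1 (zipIdx_fst_mem hp).1 hsim
  | some col =>
    rw [List.find?_eq_getElem?_findIdx] at hf
    obtain ⟨hlt, hj⟩ := List.getElem?_eq_some_iff.mp hf
    have hsimj : simB key reps[reps.findIdx (simB key)] = true := List.findIdx_getElem (w := hlt)
    rcases scan_out k0 k1 k2 pool hpos with ⟨-, hnone⟩ | ⟨e, hmem, hsim, hst, hmin⟩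
    · exfalso
      have hmemj := hcomplete _ hlt hsimj
      have hx := hnone _ hmemj
      rw [simE_entryOf] at hx
      exact absurd hsimj (by simp [hx])
    · obtain ⟨p, hp, rfl⟩ := hsound e hmem
      rw [simE_entryOf] at hsim
      have hple := zipIdx_fst_mem hp
      have hpr : p.1 = reps[p.2]'(hple.2) := zipIdx_fst_getElem hp hple.2
      have h1' : p.2 ≤ reps.findIdx (simB key) := by
        have h := hmin _ (hcomplete _ hlt hsimj) (by rw [simE_entryOf]; exact hsimj)
        rw [hst] at h
        simp only [entryOf] at h
        exact_mod_cast h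
      have h2 : reps.findIdx (simB key) ≤ p.2 := by
        by_contra hcon
        have hcon' : p.2 < reps.findIdx (simB key) := by omega
        have hfalse : simB key (reps[p.2]'(hple.2)) = false := List.not_of_lt_findIdx hcon'
        rw [← hpr] at hfalse
        exact absurd hsim (by simp [hfalse])
      have hpj : p.2 = reps.findIdx (simB key) := by omega
      have hcol : p.1 = col := by
        have h5 : reps[p.2]? = some col := by rw [hpj]; exact hf
        rw [List.getElem?_eq_getElem hple.2] at h5
        rw [hpr]
        exact Option.some.inj h5
      rw [hst]
      simp [entryOf, hcol]

lemma keys_inv {reps : List (List Int)} {counts : PySem.Dict (List Int) Int} :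
    (PySem.Dict.mk (reps.map (fun r => (r, counts.getD r 0)))).keys = reps := by
  simp [PySem.Dict.keys_mk, List.map_map, Function.comp_def]

lemma getD_mk_map {reps : List (List Int)} {counts : PySem.Dict (List Int) Int}
    (hnd : reps.Nodup) {col : List Int} (hcol : col ∈ reps) :
    (PySem.Dict.mk (reps.map (fun r => (r, counts.getD r 0)))).getD col 0 = counts.getD col 0 := by
  apply PySem.Dict.getD_of_mem_items
  · exact List.mem_map.mpr ⟨col, hcol, rfl⟩
  · rw [keys_inv]; exact hnd

lemma loop_agree : ∀ (cd : List (List Int × Int)) (reps : List (List Int))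
    (counts : PySem.Dict (List Int) Int) (grid : PySem.Dict (Int × Int × Int) (List EntryB))
    (d : PySem.Dict (List Int) Int), StInv d reps counts grid → (∀ p ∈ cd, 3 ≤ p.1.length) →
    ∃ reps' counts' grid', loopB cd (reps, counts, grid) = some (reps', counts', grid') ∧
      loopA cd d = some (PySem.Dict.mk (reps'.map (fun r => (r, counts'.getD r 0)))) ∧
      reps'.Nodup := by
  intro cd
  induction cd with
  | nil =>
    intro reps counts grid d hInv hcd
    obtain ⟨hd, hnd, -, -⟩ := hInv
    exact ⟨reps, counts, grid, rfl, by rw [loopA, hd], hnd⟩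
  | cons kv rest ih =>
    rcases kv with ⟨key, val⟩
    intro reps counts grid d hInv hcd
    obtain ⟨hd, hnd, hlen, hg⟩ := hInv
    have hk : 3 ≤ key.length := hcd (key, val) (by simp)
    subst hd
    -- reduce A's step
    rw [loopA, keys_inv, scanA_eq hk hlen]
    -- reduce B's step
    rw [loopB, pyGet?_len3_0 hk, pyGet?_len3_1 hk, pyGet?_len3_2 hk]
    simp only
    rw [scan_bridge hg]
    cases hf : reps.find? (simB key) with
    | some col =>
      dsimp only
      have hcolmem : col ∈ reps := List.mem_of_find?_eq_some hf
      have hgetD : (PySem.Dict.mk (reps.map (fun r => (r, counts.getD r 0)))).getD col 0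
          = counts.getD col 0 := getD_mk_map hnd hcolmem
      rw [hgetD]
      apply ih
      · refine ⟨?_, hnd, hlen, hg⟩
        apply PySem.Dict.ext
        rw [PySem.Dict.items_insert_of_contains _ _
          (by rw [PySem.Dict.contains_eq_decide_mem_keys, keys_inv]; simpa using hcolmem)]
        show List.map _ (List.map _ reps) = _
        rw [List.map_map]
        apply List.map_congr_left
        intro r hr
        simp only [Function.comp_apply]
        by_cases hrc : r = col
        · subst hrc
          simp
        · rw [if_neg (by simpa using hrc), PySem.Dict.getD_insert, if_neg hrc]
      · exact fun p hp => hcd p (by simp [hp])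
    | none =>
      dsimp only
      have hall : ∀ r ∈ reps, ¬ simB key r = true := List.find?_eq_none.mp hf
      have hkey : key ∉ reps := fun hmem => hall key hmem simB_refl
      have hcont : (PySem.Dict.mk (reps.map (fun r => (r, counts.getD r 0)))).contains key = false := by
        rw [PySem.Dict.contains_eq_decide_mem_keys, keys_inv]
        simpa using hkey
      have hgetD : (PySem.Dict.mk (reps.map (fun r => (r, counts.getD r 0)))).getD key 0 = 0 :=
        PySem.Dict.getD_of_not_contains _ _ hcont
      rw [hgetD]
      apply ih
      · refine ⟨?_, ?_, ?_, ?_⟩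
        · apply PySem.Dict.ext
          rw [PySem.Dict.items_insert_of_not_contains _ _ hcont]
          show _ ++ _ = (reps ++ [key]).map _
          rw [List.map_append]
          congr 1
          · apply List.map_congr_left
            intro r hr
            rw [PySem.Dict.getD_insert, if_neg (by rintro rfl; exact hkey hr)]
          · simp
        · exact hnd.append (List.nodup_singleton _) (by simpa using hkey)
        · intro r hr
          rcases List.mem_append.mp hr with h | h
          · exact hlen r h
          · simp only [List.mem_singleton] at h; subst h; exact hk
        · intro c
          rw [PySem.Dict.getD_modify]
          have hzip : (reps ++ [key]).zipIdx = reps.zipIdx ++ [(key, reps.length)] := by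
            rw [List.zipIdx_append]
            simp
          rw [hzip, List.filter_append, List.map_append]
          by_cases hc : c = (PySem.Int.floordiv (coord0 key) 20, PySem.Int.floordiv (coord1 key) 20,
              PySem.Int.floordiv (coord2 key) 20)
          · subst hc
            rw [if_pos rfl]
            congr 1
            · exact hg _
            · simp only [List.filter_cons, List.filter_nil, cellF]
              rw [if_pos (by simp)]
              simp [entryOf]
          · rw [if_neg hc, hg c]
            have hnc : ¬ (cellF key = c) := by
              intro h
              exact hc (by rw [← h]; rfl)
            simp [hnc]
      · exact fun p hp => hcd p (by simp [hp])

-- ===== VERDICT (by name: the statement is the Claim_ definition above) =====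
theorem merge_similar_colors_spec : Claim_equal_merge_similar_colors := by
  intro cd _ hpre
  obtain ⟨-, hlen⟩ := hpre
  unfold Spec_merge_similar_colors
  obtain ⟨reps', counts', grid', hB, hA, hnd'⟩ :=
    loop_agree cd [] PySem.Dict.empty PySem.Dict.empty PySem.Dict.empty
      ⟨rfl, by simp, by simp, fun c => by simp [PySem.Dict.getD_empty]⟩ hlen
  unfold merge_similar_colors merge_similar_colors_alt
  rw [hA, hB]
  simp only [Option.map_some, Option.getD_some]
  rw [PySem.Dict.items_foldl_insert_fresh reps' (fun r => r) (fun r => counts'.getD r 0)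
    PySem.Dict.empty (fun a _ => PySem.Dict.contains_empty _) (by simpa using hnd')]
  simp [PySem.Dict.empty]
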